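-- pv_equiv track=rewrite | github.com/GuillaumeLaplante-Anfossi/Poissons | GeneratingDiagonalsViaShift/multiplihedra.py | ordered_partitions
-- ===== SOURCE A (Python) =====
-- from itertools import combinations
--
-- def ordered_partitions(a, k):
--     '''Splits a into k ordered partitions'''
--     n = len(a)
--     assert 1 <= k <= n, (n, k)
--
--     def split_at(js):
--         i = 0
--
--         for j in js:
--             yield a[i:j]
--             i = j
--
--         yield a[i:]
--
--     for separations in combinations(range(1, n), k - 1):
--         yield list(split_at(separations))
-- ===== SOURCE B (Python) =====
-- def ordered_partitions(a, k):
--     '''Splits a into k ordered partitions'''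
--     n = len(a)
--     assert 1 <= k <= n, (n, k)
--
--     def rec(a, k):
--         if k == 1:
--             yield [a]
--             return
--         for i in range(1, len(a) - k + 2):
--             for rest in rec(a[i:], k - 1):
--                 yield [a[:i]] + rest
--
--     yield from rec(a, k)
-- ===== Notes on version B (the rewrite author's own statement) =====
-- stated objective: alternative
-- what changed: Replaces the enumeration of separator-index combinations plus a slicing generator by a direct recursive generator: choose the first part's length and recurse on the suffix with k-1 parts.
import Mathlib
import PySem

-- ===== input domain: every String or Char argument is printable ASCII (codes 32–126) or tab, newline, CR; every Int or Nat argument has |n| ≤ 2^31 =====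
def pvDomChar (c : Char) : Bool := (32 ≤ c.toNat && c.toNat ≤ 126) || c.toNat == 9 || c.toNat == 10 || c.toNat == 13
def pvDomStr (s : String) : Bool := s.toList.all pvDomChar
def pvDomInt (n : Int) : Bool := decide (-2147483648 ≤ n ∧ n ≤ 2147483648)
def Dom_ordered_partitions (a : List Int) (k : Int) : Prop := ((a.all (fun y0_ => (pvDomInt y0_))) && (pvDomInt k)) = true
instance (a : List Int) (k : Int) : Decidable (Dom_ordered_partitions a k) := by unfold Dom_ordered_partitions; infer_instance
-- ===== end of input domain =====

-- B replaces A's combinations-of-separators enumeration by a recursive generator on the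
-- first part's length; equivalence of the RETURNED sequence of partitions is proved below.

-- ===== PORT A =====
-- itertools.combinations(l, r) in lexicographic order (over a duplicate-free index list)
def combsA : List Int → Nat → List (List Int)
  | _, 0 => [[]]
  | [], _ + 1 => []
  | x :: xs, r + 1 => (combsA xs r).map (fun c => x :: c) ++ combsA xs (r + 1)

-- the inner generator split_at(js): yields a[i:j] advancing i, then the tail a[i:]
def splitA (a : List Int) : Int → List Int → List (List Int)
  | i, [] => [PySem.List.slice a (some i) none]
  | i, j :: js => PySem.List.slice a (some i) (some j) :: splitA a j js

def ordered_partitions (a : List Int) (k : Int) : List (List (List Int)) :=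
  if 1 ≤ k ∧ k ≤ (a.length : Int) then
    (combsA (PySem.List.pyRange 1 (a.length : Int) 1) (k - 1).toNat).map (fun js => splitA a 0 js)
  else []  -- assert fails: excluded by Pre_

-- ===== PORT B =====
-- rec(a, k): k == 1 yields [a]; else for i in range(1, len(a)-k+2) prepend a[:i] to rec(a[i:], k-1)
def recB : Nat → List Int → List (List (List Int))
  | 0, _ => []  -- unreachable under Pre_ (k ≥ 1)
  | 1, a => [[a]]
  | (m + 2), a =>
      (PySem.List.pyRange 1 ((a.length : Int) - ((m : Int) + 2) + 2) 1).flatMap (fun i =>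
        (recB (m + 1) (PySem.List.slice a (some i) none)).map
          (fun rest => PySem.List.slice a none (some i) :: rest))

def ordered_partitions_alt (a : List Int) (k : Int) : List (List (List Int)) :=
  if 1 ≤ k ∧ k ≤ (a.length : Int) then recB k.toNat a
  else []  -- assert fails: excluded by Pre_

-- ===== PRECONDITION & SPEC =====
-- Pre_ excludes exactly the inputs where A's 'assert 1 <= k <= n' raises AssertionError.
def Pre_ordered_partitions (a : List Int) (k : Int) : Prop := 1 ≤ k ∧ k ≤ (a.length : Int)
instance (a : List Int) (k : Int) : Decidable (Pre_ordered_partitions a k) := by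
  unfold Pre_ordered_partitions; infer_instance

def pvWitness_ordered_partitions : List Int × Int := ([1, 2, 3], 2)

def Spec_ordered_partitions (a : List Int) (k : Int) (out : List (List (List Int))) : Prop := out = ordered_partitions_alt a k
instance (a : List Int) (k : Int) (out : List (List (List Int))) : Decidable (Spec_ordered_partitions a k out) := by unfold Spec_ordered_partitions; infer_instance

-- ===== CLAIM (what is proved, stated in full; the proofs are below) =====
def Claim_equal_ordered_partitions : Prop := ∀ (a : List Int) (k : Int), Dom_ordered_partitions a k → Pre_ordered_partitions a k → Spec_ordered_partitions a k (ordered_partitions a k)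

-- ===== LEMMAS AND PROOFS =====

-- combinations of a too-short pool are empty
lemma combsA_nil_of_short : ∀ (l : List Int) (r : Nat), l.length < r → combsA l r = [] := by
  intro l
  induction l with
  | nil => intro r h; cases r with
    | zero => omega
    | succ r => rfl
  | cons x xs ih =>
      intro r h
      cases r with
      | zero => simp at h
      | succ r =>
          have h1 : xs.length < r := by simp at h; omega
          simp [combsA, ih r h1, ih (r + 1) (by omega)]

-- every element of a combination comes from the pool
lemma mem_combsA : ∀ (l : List Int) (r : Nat) (js : List Int), js ∈ combsA l r →
    ∀ y ∈ js, y ∈ l := by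
  intro l
  induction l with
  | nil =>
      intro r js hjs y hy
      cases r with
      | zero => simp [combsA] at hjs; subst hjs; simp at hy
      | succ r => simp [combsA] at hjs
  | cons x xs ih =>
      intro r js hjs y hy
      cases r with
      | zero =>
          simp [combsA] at hjs; subst hjs; simp at hy
      | succ r =>
          simp only [combsA, List.mem_append, List.mem_map] at hjs
          rcases hjs with ⟨c, hc, rfl⟩ | hjs
          · rcases List.mem_cons.mp hy with rfl | hy
            · exact List.mem_cons_self
            · exact List.mem_cons_of_mem _ (ih r c hc y hy)
          · exact List.mem_cons_of_mem _ (ih (r + 1) js hjs y hy)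

-- grouping combinations of a range by their first element
lemma combsA_range_group (n : Int) (r : Nat) : ∀ (i : Int),
    combsA (PySem.List.pyRange i n 1) (r + 1) =
      (PySem.List.pyRange i n 1).flatMap
        (fun j => (combsA (PySem.List.pyRange (j + 1) n 1) r).map (fun c => j :: c)) := by
  intro i
  by_cases h : i < n
  · rw [PySem.List.pyRange_one_cons h]
    simp only [combsA, List.flatMap_cons]
    rw [combsA_range_group n r (i + 1)]
  · rw [PySem.List.pyRange_one_eq_nil (by omega)]
    rfl
termination_by i => (n - i).toNat
decreasing_by omega

-- shifting a unit-step range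
lemma pyRange_shift (a b j : Int) :
    (PySem.List.pyRange a b 1).map (fun x => x + j) = PySem.List.pyRange (a + j) (b + j) 1 := by
  rw [PySem.List.pyRange_one a b, PySem.List.pyRange_one (a + j) (b + j), List.map_map]
  have : (b + j - (a + j)) = b - a := by ring
  rw [this]
  apply List.map_congr_left
  intro x _
  simp; ring

-- combinations commute with mapping an injective shift over the pool
lemma combsA_map_shift (j : Int) : ∀ (l : List Int) (r : Nat),
    combsA (l.map (fun x => x + j)) r = (combsA l r).map (List.map (fun x => x + j)) := by
  intro l
  induction l with
  | nil => intro r; cases r <;> rfl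
  | cons x xs ih =>
      intro r
      cases r with
      | zero => rfl
      | succ r => simp [combsA, ih r, ih (r + 1), List.map_map]

-- splitting a shifted separator list equals splitting the dropped list
lemma splitA_shift (j : Int) (hj : 0 ≤ j) : ∀ (js : List Int) (a : List Int) (x : Int),
    0 ≤ x → (∀ y ∈ js, 0 ≤ y) →
    splitA a (x + j) (js.map (fun y => y + j)) = splitA (a.drop j.toNat) x js := by
  intro js
  induction js with
  | nil =>
      intro a x hx _
      simp only [List.map_nil, splitA]
      rw [PySem.List.slice_from a (by omega : (0 : Int) ≤ x + j),
          PySem.List.slice_from (a.drop j.toNat) hx, List.drop_drop]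
      have h2 : (x + j).toNat = j.toNat + x.toNat := by omega
      rw [h2]
  | cons y js ih =>
      intro a x hx hnn
      have hy : 0 ≤ y := hnn y List.mem_cons_self
      simp only [List.map_cons, splitA]
      rw [PySem.List.slice_toNat a (by omega : (0 : Int) ≤ x + j) (by omega : (0 : Int) ≤ y + j),
          PySem.List.slice_toNat (a.drop j.toNat) hx hy, List.drop_drop,
          ih a y hy (fun z hz => hnn z (List.mem_cons_of_mem _ hz))]
      have h1 : (y + j).toNat - (x + j).toNat = y.toNat - x.toNat := by omega
      have h2 : (x + j).toNat = j.toNat + x.toNat := by omega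
      rw [h1, h2]

-- main bridge: A's mapped combinations equal B's recursion, for k = m + 1 parts
lemma main_bridge : ∀ (m : Nat) (a : List Int), (m : Int) + 1 ≤ (a.length : Int) →
    (combsA (PySem.List.pyRange 1 (a.length : Int) 1) m).map (fun js => splitA a 0 js) =
      recB (m + 1) a := by
  intro m
  induction m with
  | zero =>
      intro a _
      simp only [combsA, List.map_cons, List.map_nil, splitA, recB]
      rw [PySem.List.slice_from a (le_refl 0)]
      simp
  | succ m ih =>
      intro a hlen
      set n : Int := (a.length : Int) with hn
      rw [combsA_range_group, List.map_flatMap]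
      have hsplit : PySem.List.pyRange 1 n 1 =
          PySem.List.pyRange 1 (n - m) 1 ++ PySem.List.pyRange (n - m) n 1 :=
        PySem.List.pyRange_one_append 1 (n - m) n (by omega) (by omega)
      rw [hsplit, List.flatMap_append]
      have htail : (PySem.List.pyRange (n - m) n 1).flatMap
          (fun j => ((combsA (PySem.List.pyRange (j + 1) n 1) m).map (fun c => j :: c)).map
            (fun js => splitA a 0 js)) = [] := by
        apply List.flatMap_eq_nil_iff.mpr
        intro j hj
        rw [PySem.List.mem_pyRange_one] at hj
        have : combsA (PySem.List.pyRange (j + 1) n 1) m = [] :=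
          combsA_nil_of_short _ _ (by rw [PySem.List.length_pyRange_one]; omega)
        rw [this]
        rfl
      rw [htail, List.append_nil]
      show _ = recB (m + 1 + 1) a
      rw [recB]
      have hbound : n - (↑m + 2) + 2 = n - m := by ring
      rw [← hn, hbound]
      apply List.flatMap_congr
      intro j hj
      rw [PySem.List.mem_pyRange_one] at hj
      have hj0 : (0 : Int) ≤ j := by omega
      have hdrop : PySem.List.slice a (some j) none = a.drop j.toNat :=
        PySem.List.slice_from a hj0
      have hlen' : (((a.drop j.toNat).length : Nat) : Int) = n - j := by
        simp only [List.length_drop]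
        omega
      rw [hdrop, ← ih (a.drop j.toNat) (by omega)]
      have hrange : PySem.List.pyRange (j + 1) n 1 =
          (PySem.List.pyRange 1 (((a.drop j.toNat).length : Nat) : Int) 1).map
            (fun x => x + j) := by
        rw [pyRange_shift, hlen']
        congr 1 <;> ring
      rw [hrange, combsA_map_shift, List.map_map, List.map_map, List.map_map]
      apply List.map_congr_left
      intro c hc
      have hcnn : ∀ y ∈ c, (0 : Int) ≤ y := by
        intro y hy
        have := mem_combsA _ _ _ hc y hy
        rw [PySem.List.mem_pyRange_one] at this
        omega
      simp only [Function.comp_apply, splitA]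
      have hs := splitA_shift j hj0 c a 0 (le_refl 0) hcnn
      rw [zero_add] at hs
      rw [PySem.List.slice_zero_start, hs]

-- ===== VERDICT (by name: the statement is the Claim_ definition above) =====
theorem ordered_partitions_spec : Claim_equal_ordered_partitions := by
  intro a k _ hpre
  obtain ⟨h1, h2⟩ := hpre
  unfold Spec_ordered_partitions ordered_partitions ordered_partitions_alt
  rw [if_pos ⟨h1, h2⟩, if_pos ⟨h1, h2⟩]
  have hk : k.toNat = (k - 1).toNat + 1 := by omega
  rw [hk]
  exact main_bridge (k - 1).toNat a (by omega)
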